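-- pv_equiv track=rewrite | github.com/SI-RISCV/e200_opensource | riscv-tools/riscv-tests/debug/gdbserver.py | ihex_line
-- ===== SOURCE A (Python) =====
-- def ihex_line(address, record_type, data):
--     assert len(data) < 128
--     line = ":%02X%04X%02X" % (len(data), address, record_type)
--     check = len(data)
--     check += address % 256
--     check += address >> 8
--     check += record_type
--     for char in data:
--         value = ord(char)
--         check += value
--         line += "%02X" % value
--     line += "%02X\n" % ((256-check)%256)
--     return line
-- ===== SOURCE B (Python) =====
-- def ihex_line(address, record_type, data):
--     assert len(data) < 128
--     payload = data.encode('latin-1')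
--     header = [len(payload), address >> 8, address % 256, record_type]
--     checksum = -(sum(header) + sum(payload)) % 256
--     return ':%02X%04X%02X%s%02X\n' % (
--         len(payload), address, record_type, payload.hex().upper(), checksum)
-- ===== Notes on version B (the rewrite author's own statement) =====
-- stated objective: idiomatic
-- what changed: B encodes the data to bytes and produces the body with bytes.hex().upper(), and computes the checksum as the negated mod-256 sum of a header byte list plus the payload bytes, assembled by one format string, instead of A's fused loop that interleaves a running checksum with per-char string concatenation.
import Mathlib
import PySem

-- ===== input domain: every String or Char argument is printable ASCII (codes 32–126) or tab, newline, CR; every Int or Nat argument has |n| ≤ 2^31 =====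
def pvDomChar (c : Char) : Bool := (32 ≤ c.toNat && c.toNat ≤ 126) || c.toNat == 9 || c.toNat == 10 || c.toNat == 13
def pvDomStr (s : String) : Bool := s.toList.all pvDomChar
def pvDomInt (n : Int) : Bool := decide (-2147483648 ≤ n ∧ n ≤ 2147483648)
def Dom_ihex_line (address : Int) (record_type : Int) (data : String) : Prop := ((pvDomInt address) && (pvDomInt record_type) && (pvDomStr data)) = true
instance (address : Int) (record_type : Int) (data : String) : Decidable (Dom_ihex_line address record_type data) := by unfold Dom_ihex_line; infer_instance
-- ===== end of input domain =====

-- B is bytes-oriented: body via encode + hex().upper(), checksum as negated mod-256 sum of a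
-- header byte list plus payload, one format string — instead of A's fused accumulator loop
-- (objective: idiomatic).

-- Shared helper: Python's "%0wX" % n formatting (zero-padded uppercase hex, Python's sign rule),
-- exact for any Int and width.
def hexDigit (n : Nat) : Char := if n < 10 then Char.ofNat (48 + n) else Char.ofNat (55 + n)

def hexNatAux (n : Nat) (acc : List Char) : List Char :=
  if n < 16 then hexDigit n :: acc
  else hexNatAux (n / 16) (hexDigit (n % 16) :: acc)
termination_by n
decreasing_by exact Nat.div_lt_self (by omega) (by omega)

-- "%0wX" % n as a list of chars
def fmtHex (w : Nat) (n : Int) : List Char :=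
  if n < 0 then
    let ds := hexNatAux n.natAbs []
    '-' :: List.replicate (w - (ds.length + 1)) '0' ++ ds
  else
    let ds := hexNatAux n.toNat []
    List.replicate (w - ds.length) '0' ++ ds

-- ===== PORT A =====
-- literal port: header string, running check, then one loop extending (check, line) per char
def ihex_line (address : Int) (record_type : Int) (data : String) : String :=
  let line := ':' :: fmtHex 2 (data.toList.length : Int) ++ fmtHex 4 address ++ fmtHex 2 record_type
  let check : Int := (data.toList.length : Int)
  let check := check + PySem.Int.mod address 256
  let check := check + PySem.Int.floordiv address 256   -- address >> 8 is floor division by 256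
  let check := check + record_type
  let s := data.toList.foldl
    (fun (s : Int × List Char) char =>
      let value : Int := (char.toNat : Int)
      (s.1 + value, s.2 ++ fmtHex 2 value))
    (check, line)
  String.mk (s.2 ++ fmtHex 2 (PySem.Int.mod (256 - s.1) 256) ++ ['\n'])

-- ===== PORT B =====
-- literal port of Source B: payload bytes, header byte list, negated mod-256 sum checksum,
-- body = payload.hex().upper() (two lowercase hex digits per byte, then uppercased),
-- one final assembly. encode('latin-1') is the char code on the ASCII domain.
def hexDigitLower (n : Nat) : Char := if n < 10 then Char.ofNat (48 + n) else Char.ofNat (87 + n)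

def byteHexLower (v : Nat) : List Char := [hexDigitLower (v / 16), hexDigitLower (v % 16)]

def ihex_line_alt (address : Int) (record_type : Int) (data : String) : String :=
  let payload := data.toList.map Char.toNat
  let header : List Int :=
    [(payload.length : Int), PySem.Int.floordiv address 256, PySem.Int.mod address 256, record_type]
  let checksum := PySem.Int.mod (-(header.sum + (payload.map Int.ofNat).sum)) 256
  let body := (payload.flatMap byteHexLower).map Char.toUpper
  String.mk (':' :: fmtHex 2 (payload.length : Int) ++ fmtHex 4 address
    ++ fmtHex 2 record_type ++ body ++ fmtHex 2 checksum ++ ['\n'])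

-- ===== PRECONDITION & SPEC =====
-- Pre_ excludes exactly the inputs on which A's `assert len(data) < 128` raises AssertionError.
def Pre_ihex_line (address : Int) (record_type : Int) (data : String) : Prop :=
  data.toList.length < 128
instance (address : Int) (record_type : Int) (data : String) : Decidable (Pre_ihex_line address record_type data) := by unfold Pre_ihex_line; infer_instance

def pvWitness_ihex_line : Int × Int × String := (4096, 0, "Hi")

def Spec_ihex_line (address : Int) (record_type : Int) (data : String) (out : String) : Prop := out = ihex_line_alt address record_type data
instance (address : Int) (record_type : Int) (data : String) (out : String) : Decidable (Spec_ihex_line address record_type data out) := by unfold Spec_ihex_line; infer_instance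

-- ===== CLAIM (what is proved, stated in full; the proofs are below) =====
def Claim_equal_ihex_line : Prop := ∀ (address : Int) (record_type : Int) (data : String), Dom_ihex_line address record_type data → Pre_ihex_line address record_type data → Spec_ihex_line address record_type data (ihex_line address record_type data)

-- ===== LEMMAS AND PROOFS =====
-- A's loop state equals (initial check + sum of values, initial line ++ per-char %02X chunks)
lemma ihex_loop_eq (l : List Char) (c0 : Int) (acc : List Char) :
    l.foldl (fun (s : Int × List Char) char =>
        (s.1 + (char.toNat : Int), s.2 ++ fmtHex 2 (char.toNat : Int))) (c0, acc)
    = (c0 + (l.map (fun c => (c.toNat : Int))).sum,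
       acc ++ l.flatMap (fun c => fmtHex 2 (c.toNat : Int))) := by
  induction l generalizing c0 acc with
  | nil => simp
  | cons ch t ih =>
      simp only [List.foldl_cons, ih, List.map_cons, List.sum_cons, List.flatMap_cons]
      exact Prod.ext (by ring) (by simp [List.append_assoc])

-- A's per-char "%02X" chunk equals B's lowercase-then-uppercase pair, for byte-sized codes
lemma hexNatAux_small (n : Nat) (acc : List Char) (h : n < 16) :
    hexNatAux n acc = hexDigit n :: acc := by
  rw [hexNatAux]; simp [h]

lemma fmtHex2_eq_byteHexUpper (v : Nat) (h : v < 256) :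
    fmtHex 2 (v : Int) = (byteHexLower v).map Char.toUpper := by
  have hd : ∀ d, d < 16 → Char.toUpper (hexDigitLower d) = hexDigit d := by decide
  unfold fmtHex byteHexLower
  rw [if_neg (by omega)]
  simp only [Int.toNat_natCast, List.map_cons, List.map_nil]
  rw [hd _ (by omega), hd _ (by omega)]
  by_cases h16 : v < 16
  · rw [hexNatAux_small _ _ h16]
    have h0 : v / 16 = 0 := by omega
    have hm : v % 16 = v := by omega
    simp [h0, hm, hexDigit]
  · rw [hexNatAux, if_neg h16, hexNatAux_small _ _ (by omega)]
    simp

-- hence the whole bodies agree on Dom strings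
lemma body_eq (l : List Char) (h : l.all pvDomChar = true) :
    l.flatMap (fun c => fmtHex 2 (c.toNat : Int))
      = ((l.map Char.toNat).flatMap byteHexLower).map Char.toUpper := by
  induction l with
  | nil => simp
  | cons c t ih =>
      simp only [List.all_cons, Bool.and_eq_true] at h
      have hc : c.toNat < 256 := by
        have := h.1; unfold pvDomChar at this
        simp only [Bool.or_eq_true, Bool.and_eq_true, decide_eq_true_eq, beq_iff_eq] at this
        omega
      simp only [List.flatMap_cons, List.map_cons, List.map_append, ih h.2]
      rw [fmtHex2_eq_byteHexUpper _ hc]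

-- the final checksum byte: A's (256-check)%256 equals B's negated masked sum mod 256
lemma check_eq (L m f r S : Int) :
    PySem.Int.mod (256 - (L + m + f + r + S)) 256
      = PySem.Int.mod (-(L + (f + (m + (r + 0))) + S)) 256 := by
  rw [PySem.Int.mod_eq_emod_of_pos (by norm_num), PySem.Int.mod_eq_emod_of_pos (by norm_num)]
  omega

theorem ihex_line_spec : Claim_equal_ihex_line := by
  intro address record_type data hdom _
  show ihex_line address record_type data = ihex_line_alt address record_type data
  unfold Dom_ihex_line at hdom
  simp only [Bool.and_eq_true] at hdom
  unfold ihex_line ihex_line_alt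
  simp only [ihex_loop_eq]
  rw [body_eq data.toList (by unfold pvDomStr at hdom; exact hdom.2)]
  simp only [List.length_map, List.map_map, List.sum_cons, List.sum_nil]
  have hsum : (data.toList.map (Int.ofNat ∘ Char.toNat)).sum
      = (data.toList.map (fun c => (c.toNat : Int))).sum := rfl
  rw [hsum, check_eq]
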